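-- pv_equiv track=rewrite | github.com/TAgorithm/Tagorithm_study | 2022_study/Nov/week5/PGMS81302/jiyeon_81302_p.py | bfs
-- ===== SOURCE A (Python) =====
-- from collections import deque
--
-- def bfs(place):
--     dq = deque()
--     dx = [0,0,1,-1,1,1,-1,-1, 0, 0, 2, -2]
--     dy = [1,-1,0,0,1,-1,1,-1, 2, -2, 0, 0]
--
--     for i in range(5):
--         for j in range(5):
--             if place[i][j] == 'P':
--                 dq.append([i,j])
--
--     while(len(dq) != 0):
--         x, y = dq.popleft()
--         for i in range(12):
--             nx = x + dx[i]
--             ny = y + dy[i]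
--
--             if (nx >= 0) and (nx < 5) and (ny >= 0) and (ny < 5):
--                 if place[nx][ny] == 'P':
--                     if nx == x:
--                         if abs(ny - y) == 1:
--                             return 0
--                         if ny < y:
--                             y1 = y-1
--                         else:
--                             y1 = y+1
--                         if place[x][y1] != 'X':
--                             return 0
--                     elif ny == y:
--                         if abs(nx - x) == 1:
--                             return 0
--                         if nx < x:
--                             x1 = x-1
--                         else:
--                             x1 = x+1
--                         if place[x1][y] != 'X':
--                             return 0
--                     else:
--                         if (nx > x) and (ny > y):
--                             y1 = y+1
--                             x2 = x+1
--                         elif (nx > x) and (ny < y):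
--                             y1 = y-1
--                             x2 = x+1
--                         elif (nx < x) and (ny > y):
--                             y1 = y+1
--                             x2 = x-1
--                         else:
--                             y1 = y-1
--                             x2 = x-1
--                         if (place[x][y1] != 'X') or (place[x2][y] != 'X'):
--                             return 0
--
--     return 1
-- ===== SOURCE B (Python) =====
-- def bfs(place):
--     ps = [(i, j) for i in range(5) for j in range(5) if place[i][j] == 'P']
--     for k, (x, y) in enumerate(ps):
--         for (a, b) in ps[k + 1:]:
--             dx, dy = a - x, b - y
--             s = abs(dx) + abs(dy)
--             if s == 1:
--                 return 0
--             if s != 2: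
--                 continue
--             if dx == 0:
--                 if place[x][(y + b) // 2] != 'X':
--                     return 0
--             elif dy == 0:
--                 if place[(x + a) // 2][y] != 'X':
--                     return 0
--             else:
--                 if place[x][b] != 'X' or place[a][y] != 'X':
--                     return 0
--     return 1
-- ===== Notes on version B (the rewrite author's own statement) =====
-- stated objective: simpler
-- what changed: Replaces the deque-plus-12-hardcoded-offset-tables scan with a single comprehension collecting the P cells followed by a pairwise check of each unordered pair of P cells via Manhattan distance and midpoint arithmetic.
import Mathlib
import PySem

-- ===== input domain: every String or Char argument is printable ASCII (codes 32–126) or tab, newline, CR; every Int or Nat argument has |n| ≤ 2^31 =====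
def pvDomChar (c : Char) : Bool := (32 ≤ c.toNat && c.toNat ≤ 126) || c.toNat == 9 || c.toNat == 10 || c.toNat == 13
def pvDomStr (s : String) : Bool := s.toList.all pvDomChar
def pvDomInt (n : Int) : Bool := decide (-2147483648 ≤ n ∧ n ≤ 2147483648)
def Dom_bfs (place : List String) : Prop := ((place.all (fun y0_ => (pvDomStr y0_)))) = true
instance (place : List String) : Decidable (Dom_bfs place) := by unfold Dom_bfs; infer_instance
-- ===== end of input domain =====

-- B replaces A's queue plus 12-entry offset tables by a pairwise scan over the list of 'P' cells
-- using Manhattan distance and midpoint arithmetic (objective: simpler).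

-- shared cell accessor: place[i][j]; total via defaults, exact on inputs satisfying Pre_bfs
def pvCell (place : List String) (i j : Int) : Char :=
  (PySem.Str.pyGet? ((PySem.List.pyGet? place i).getD "") j).getD ' '

-- ===== PORT A =====
def pvDx : List Int := [0, 0, 1, -1, 1, 1, -1, -1, 0, 0, 2, -2]
def pvDy : List Int := [1, -1, 0, 0, 1, -1, 1, -1, 2, -2, 0, 0]

-- body of one iteration of A's inner 'for i in range(12)': some 0 = 'return 0', none = fall through
def pvCheck (place : List String) (x y nx ny : Int) : Option Int :=
  if 0 ≤ nx ∧ nx < 5 ∧ 0 ≤ ny ∧ ny < 5 then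
    if pvCell place nx ny = 'P' then
      if nx = x then
        if (ny - y).natAbs = 1 then some 0
        else
          let y1 := if ny < y then y - 1 else y + 1
          if pvCell place x y1 ≠ 'X' then some 0 else none
      else if ny = y then
        if (nx - x).natAbs = 1 then some 0
        else
          let x1 := if nx < x then x - 1 else x + 1
          if pvCell place x1 y ≠ 'X' then some 0 else none
      else
        let yx :=
          if nx > x ∧ ny > y then (y + 1, x + 1)
          else if nx > x ∧ ny < y then (y - 1, x + 1)
          else if nx < x ∧ ny > y then (y + 1, x - 1)
          else (y - 1, x - 1)
        if pvCell place x yx.1 ≠ 'X' ∨ pvCell place yx.2 y ≠ 'X' then some 0 else none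
    else none
  else none

-- A's inner 'for i in range(12)' with its early returns
def pvScan (place : List String) (x y : Int) : Option Int :=
  (PySem.List.pyRange 0 12 1).findSome? fun i =>
    pvCheck place x y (x + PySem.List.pyGetD pvDx i 0) (y + PySem.List.pyGetD pvDy i 0)

-- A's 'while len(dq) != 0' queue loop
def pvLoop (place : List String) : List (Int × Int) → Int
  | [] => 1
  | (x, y) :: dq =>
    match pvScan place x y with
    | some r => r
    | none => pvLoop place dq

def bfs (place : List String) : Int :=
  let dq := (PySem.List.pyRange 0 5 1).foldl (fun acc i =>
      (PySem.List.pyRange 0 5 1).foldl (fun acc2 j =>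
        if pvCell place i j == 'P' then acc2 ++ [(i, j)] else acc2) acc) []
  pvLoop place dq

-- ===== PORT B =====
-- B's visibility test between two 'P' cells: Manhattan distance 1, or distance 2 with the
-- intermediate cell(s) not all 'X' (midpoint for straight lines, the two corners for diagonals)
def pvSees (place : List String) (x y a b : Int) : Bool :=
  let dx := a - x
  let dy := b - y
  let s := dx.natAbs + dy.natAbs
  if s = 1 then true
  else if s ≠ 2 then false
  else if dx = 0 then pvCell place x (PySem.Int.floordiv (y + b) 2) != 'X'
  else if dy = 0 then pvCell place (PySem.Int.floordiv (x + a) 2) y != 'X'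
  else pvCell place x b != 'X' || pvCell place a y != 'X'

-- B's 'for k, (x, y) in enumerate(ps): … for (a, b) in ps[k+1:]' pair scan
def pvPairs (place : List String) : List (Int × Int) → Int
  | [] => 1
  | (x, y) :: rest =>
    if rest.any (fun q => pvSees place x y q.1 q.2) then 0 else pvPairs place rest

def bfs_alt (place : List String) : Int :=
  let ps := (PySem.List.pyRange 0 5 1).flatMap fun i =>
    ((PySem.List.pyRange 0 5 1).filter (fun j => pvCell place i j == 'P')).map fun j => (i, j)
  pvPairs place ps

-- ===== PRECONDITION & SPEC =====
-- Pre_ excludes exactly the inputs on which A raises IndexError: fewer than 5 rows, or one of the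
-- first 5 rows shorter than 5 characters.
def Pre_bfs (place : List String) : Prop :=
  5 ≤ place.length ∧ ∀ s ∈ place.take 5, 5 ≤ s.toList.length
instance (place : List String) : Decidable (Pre_bfs place) := by unfold Pre_bfs; infer_instance
def pvWitness_bfs : List String := ["OOOOO", "OOOOO", "OOOOO", "OOOOO", "OOOOO"]

def Spec_bfs (place : List String) (out : Int) : Prop := out = bfs_alt place
instance (place : List String) (out : Int) : Decidable (Spec_bfs place out) := by unfold Spec_bfs; infer_instance

-- ===== CLAIM (what is proved, stated in full; the proofs are below) =====
def Claim_equal_bfs : Prop := ∀ (place : List String), Dom_bfs place → Pre_bfs place → Spec_bfs place (bfs place)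

-- ===== LEMMAS AND PROOFS =====

-- the list of 'P' cells, as B builds it
def pvPs (place : List String) : List (Int × Int) :=
  (PySem.List.pyRange 0 5 1).flatMap fun i =>
    ((PySem.List.pyRange 0 5 1).filter (fun j => pvCell place i j == 'P')).map fun j => (i, j)

lemma pvPs_mem (place : List String) (q : Int × Int) :
    q ∈ pvPs place ↔ 0 ≤ q.1 ∧ q.1 < 5 ∧ 0 ≤ q.2 ∧ q.2 < 5 ∧ pvCell place q.1 q.2 = 'P' := by
  obtain ⟨a, b⟩ := q
  simp only [pvPs, List.mem_flatMap, List.mem_map, List.mem_filter,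
    PySem.List.mem_pyRange_one, Prod.mk.injEq]
  constructor
  · rintro ⟨i, hi, j, ⟨hj, hP⟩, rfl, rfl⟩
    exact ⟨hi.1, hi.2, hj.1, hj.2, by simpa using hP⟩
  · rintro ⟨h1, h2, h3, h4, h5⟩
    exact ⟨a, ⟨h1, h2⟩, b, ⟨⟨h3, h4⟩, by simpa using h5⟩, rfl, rfl⟩

-- the 12 relative positions A's offset tables enumerate
lemma hcase12 (x y a b : Int)
    (hs : (a - x).natAbs + (b - y).natAbs = 1 ∨ (a - x).natAbs + (b - y).natAbs = 2) :
    (x = a ∧ b = y + 1) ∨ (x = a ∧ b = y - 1) ∨ (a = x + 1 ∧ y = b) ∨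
      (a = x - 1 ∧ y = b) ∨ (a = x + 1 ∧ b = y + 1) ∨ (a = x + 1 ∧ b = y - 1) ∨
      (a = x - 1 ∧ b = y + 1) ∨ (a = x - 1 ∧ b = y - 1) ∨ (x = a ∧ b = y + 2) ∨
      (x = a ∧ b = y - 2) ∨ (a = x + 2 ∧ y = b) ∨ (a = x - 2 ∧ y = b) := by
  have hda : a - x = 0 ∨ a - x = 1 ∨ a - x = -1 ∨ a - x = 2 ∨ a - x = -2 := by omega
  have hdb : b - y = 0 ∨ b - y = 1 ∨ b - y = -1 ∨ b - y = 2 ∨ b - y = -2 := by omega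
  rcases hda with h|h|h|h|h <;> rcases hdb with g|g|g|g|g
  · exact absurd hs (by omega)
  · exact Or.inl ⟨by omega, by omega⟩
  · exact Or.inr (Or.inl ⟨by omega, by omega⟩)
  · exact Or.inr (Or.inr (Or.inr (Or.inr (Or.inr (Or.inr (Or.inr (Or.inr (Or.inl ⟨by omega, by omega⟩))))))))
  · exact Or.inr (Or.inr (Or.inr (Or.inr (Or.inr (Or.inr (Or.inr (Or.inr (Or.inr (Or.inl ⟨by omega, by omega⟩)))))))))
  · exact Or.inr (Or.inr (Or.inl ⟨by omega, by omega⟩))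
  · exact Or.inr (Or.inr (Or.inr (Or.inr (Or.inl ⟨by omega, by omega⟩))))
  · exact Or.inr (Or.inr (Or.inr (Or.inr (Or.inr (Or.inl ⟨by omega, by omega⟩)))))
  · exact absurd hs (by omega)
  · exact absurd hs (by omega)
  · exact Or.inr (Or.inr (Or.inr (Or.inl ⟨by omega, by omega⟩)))
  · exact Or.inr (Or.inr (Or.inr (Or.inr (Or.inr (Or.inr (Or.inl ⟨by omega, by omega⟩))))))
  · exact Or.inr (Or.inr (Or.inr (Or.inr (Or.inr (Or.inr (Or.inr (Or.inl ⟨by omega, by omega⟩)))))))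
  · exact absurd hs (by omega)
  · exact absurd hs (by omega)
  · exact Or.inr (Or.inr (Or.inr (Or.inr (Or.inr (Or.inr (Or.inr (Or.inr (Or.inr (Or.inr (Or.inl ⟨by omega, by omega⟩))))))))))
  · exact absurd hs (by omega)
  · exact absurd hs (by omega)
  · exact absurd hs (by omega)
  · exact absurd hs (by omega)
  · exact Or.inr (Or.inr (Or.inr (Or.inr (Or.inr (Or.inr (Or.inr (Or.inr (Or.inr (Or.inr (Or.inr ⟨by omega, by omega⟩))))))))))
  · exact absurd hs (by omega)
  · exact absurd hs (by omega)
  · exact absurd hs (by omega)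
  · exact absurd hs (by omega)

lemma pvSees_symm (place : List String) (x y a b : Int) :
    pvSees place x y a b = pvSees place a b x y := by
  unfold pvSees
  have h1 : (x - a).natAbs = (a - x).natAbs := by omega
  have h2 : (y - b).natAbs = (b - y).natAbs := by omega
  have h3 : x + a = a + x := by ring
  have h4 : y + b = b + y := by ring
  simp only [h1, h2, h3, h4]
  have h5 : (x - a = 0) ↔ (a - x = 0) := by omega
  have h6 : (y - b = 0) ↔ (b - y = 0) := by omega
  simp only [h5, h6]
  split_ifs <;> try rfl
  · have hx : a = x := by omega
    rw [hx]
  · have hy : b = y := by omega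
    rw [hy]
  · simp [Bool.or_comm]

lemma pvSees_irrefl (place : List String) (x y : Int) :
    pvSees place x y x y = false := by
  simp [pvSees]

lemma pvSees_shape (place : List String) (x y a b : Int)
    (h : pvSees place x y a b = true) :
    (a - x).natAbs + (b - y).natAbs = 1 ∨ (a - x).natAbs + (b - y).natAbs = 2 := by
  by_cases h1 : (a - x).natAbs + (b - y).natAbs = 1
  · exact Or.inl h1
  by_cases h2 : (a - x).natAbs + (b - y).natAbs = 2
  · exact Or.inr h2
  exfalso
  unfold pvSees at h
  rw [if_neg h1, if_pos h2] at h
  simp at h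

lemma pvCheck_none_or (place : List String) (x y a b : Int) :
    pvCheck place x y a b = some 0 ∨ pvCheck place x y a b = none := by
  unfold pvCheck
  split_ifs <;> simp <;> tauto

set_option maxRecDepth 8192 in
set_option maxHeartbeats 1600000 in
lemma pvCheck_iff (place : List String) (x y a b : Int)
    (hs : (a - x).natAbs + (b - y).natAbs = 1 ∨ (a - x).natAbs + (b - y).natAbs = 2) :
    pvCheck place x y a b = some 0 ↔
      (0 ≤ a ∧ a < 5 ∧ 0 ≤ b ∧ b < 5 ∧ pvCell place a b = 'P' ∧ pvSees place x y a b = true) := by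
  unfold pvCheck
  by_cases hbnd : 0 ≤ a ∧ a < 5 ∧ 0 ≤ b ∧ b < 5
  case neg => rw [if_neg hbnd]; simp; tauto
  rw [if_pos hbnd]
  by_cases hP : pvCell place a b = 'P'
  case neg => rw [if_neg hP]; simp; tauto
  rw [if_pos hP]
  obtain ⟨h1, h2, h3, h4⟩ := hbnd
  simp only [h1, h2, h3, h4, hP, true_and]
  unfold pvSees
  have hcase := hcase12 x y a b hs
  clear hs
  rcases hcase with ⟨rfl, rfl⟩ | ⟨rfl, rfl⟩ | ⟨rfl, rfl⟩ | ⟨rfl, rfl⟩ | ⟨rfl, rfl⟩ | ⟨rfl, rfl⟩ |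
    ⟨rfl, rfl⟩ | ⟨rfl, rfl⟩ | ⟨rfl, rfl⟩ | ⟨rfl, rfl⟩ | ⟨rfl, rfl⟩ | ⟨rfl, rfl⟩
  · simp only [show ((x:Int) - x) = 0 from by omega, show ((y + 1:Int) - y) = 1 from by omega]
    split_ifs <;> simp_all
  · simp only [show ((x:Int) - x) = 0 from by omega, show ((y - 1:Int) - y) = -1 from by omega]
    split_ifs <;> simp_all
  · simp only [show ¬((x + 1:Int) = x) from by omega, show ((x + 1:Int) - x) = 1 from by omega,
      show ((y:Int) - y) = 0 from by omega]
    split_ifs <;> simp_all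
  · simp only [show ¬((x - 1:Int) = x) from by omega, show ((x - 1:Int) - x) = -1 from by omega,
      show ((y:Int) - y) = 0 from by omega]
    split_ifs <;> simp_all
  · simp only [show ¬((x + 1:Int) = x) from by omega, show ¬((y + 1:Int) = y) from by omega,
      show ((x + 1:Int) - x) = 1 from by omega, show ((y + 1:Int) - y) = 1 from by omega,
      show ((x:Int) + 1 > x) from by omega, show ((y:Int) + 1 > y) from by omega]
    split_ifs <;> simp_all [bne_iff_ne]
  · simp only [show ¬((x + 1:Int) = x) from by omega, show ¬((y - 1:Int) = y) from by omega,
      show ((x + 1:Int) - x) = 1 from by omega, show ((y - 1:Int) - y) = -1 from by omega,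
      show ((x:Int) + 1 > x) from by omega, show ¬((y:Int) - 1 > y) from by omega,
      show ((y:Int) - 1 < y) from by omega]
    split_ifs <;> simp_all [bne_iff_ne]
  · simp only [show ¬((x - 1:Int) = x) from by omega, show ¬((y + 1:Int) = y) from by omega,
      show ((x - 1:Int) - x) = -1 from by omega, show ((y + 1:Int) - y) = 1 from by omega,
      show ¬((x:Int) - 1 > x) from by omega, show ((x:Int) - 1 < x) from by omega,
      show ((y:Int) + 1 > y) from by omega]
    split_ifs <;> simp_all [bne_iff_ne]
  · simp only [show ¬((x - 1:Int) = x) from by omega, show ¬((y - 1:Int) = y) from by omega,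
      show ((x - 1:Int) - x) = -1 from by omega, show ((y - 1:Int) - y) = -1 from by omega,
      show ¬((x:Int) - 1 > x) from by omega, show ¬((y:Int) - 1 > y) from by omega]
    split_ifs <;> simp_all [bne_iff_ne]
  · simp only [show ((x:Int) - x) = 0 from by omega, show ((y + 2:Int) - y) = 2 from by omega,
      show ¬((y:Int) + 2 < y) from by omega]
    have hm1 : PySem.Int.floordiv (y + (y + 2)) 2 = y + 1 := by
      rw [PySem.Int.floordiv_eq_iff_of_pos (by norm_num)]; omega
    rw [hm1]; clear hm1
    split_ifs <;> simp_all [bne_iff_ne]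
  · simp only [show ((x:Int) - x) = 0 from by omega, show ((y - 2:Int) - y) = -2 from by omega,
      show ((y:Int) - 2 < y) from by omega]
    have hm2 : PySem.Int.floordiv (y + (y - 2)) 2 = y - 1 := by
      rw [PySem.Int.floordiv_eq_iff_of_pos (by norm_num)]; omega
    rw [hm2]; clear hm2
    split_ifs <;> simp_all [bne_iff_ne]
  · simp only [show ¬((x + 2:Int) = x) from by omega, show ((x + 2:Int) - x) = 2 from by omega,
      show ((y:Int) - y) = 0 from by omega, show ¬((x:Int) + 2 < x) from by omega]
    have hm3 : PySem.Int.floordiv (x + (x + 2)) 2 = x + 1 := by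
      rw [PySem.Int.floordiv_eq_iff_of_pos (by norm_num)]; omega
    rw [hm3]; clear hm3
    split_ifs <;> simp_all [bne_iff_ne]
  · simp only [show ¬((x - 2:Int) = x) from by omega, show ((x - 2:Int) - x) = -2 from by omega,
      show ((y:Int) - y) = 0 from by omega, show ((x:Int) - 2 < x) from by omega]
    have hm4 : PySem.Int.floordiv (x + (x - 2)) 2 = x - 1 := by
      rw [PySem.Int.floordiv_eq_iff_of_pos (by norm_num)]; omega
    rw [hm4]; clear hm4
    split_ifs <;> simp_all [bne_iff_ne]

lemma pvCheck_none_of (place : List String) (x y a b : Int)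
    (hs : (a - x).natAbs + (b - y).natAbs = 1 ∨ (a - x).natAbs + (b - y).natAbs = 2)
    (h : ¬ ∃ q ∈ pvPs place, pvSees place x y q.1 q.2 = true) :
    pvCheck place x y a b = none := by
  rcases pvCheck_none_or place x y a b with h0 | h0
  · exfalso
    obtain ⟨c1, c2, c3, c4, c5, c6⟩ := (pvCheck_iff place x y a b hs).mp h0
    exact h ⟨(a, b), (pvPs_mem place (a, b)).mpr ⟨c1, c2, c3, c4, c5⟩, c6⟩
  · exact h0

lemma pvFindSome_some_zero {α : Type} (f : α → Option Int) :
    ∀ (l : List α), (∀ i ∈ l, f i = some 0 ∨ f i = none) → (∃ i ∈ l, f i = some 0) →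
      l.findSome? f = some 0
  | [] => by rintro _ ⟨i, hi, _⟩; cases hi
  | a :: l => by
    intro hall hex
    rw [List.findSome?_cons]
    rcases hall a (List.mem_cons_self) with h0 | h0
    · rw [h0]
    · rw [h0]
      apply pvFindSome_some_zero f l (fun i hi => hall i (List.mem_cons_of_mem _ hi))
      obtain ⟨i, hi, hfi⟩ := hex
      rcases List.mem_cons.mp hi with rfl | hi'
      · rw [h0] at hfi; cases hfi
      · exact ⟨i, hi', hfi⟩

lemma pvScan_eq (place : List String) (x y : Int) :
    pvScan place x y =
      if ∃ q ∈ pvPs place, pvSees place x y q.1 q.2 = true then some 0 else none := by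
  unfold pvScan
  have hfun : (fun i => pvCheck place x y (x + PySem.List.pyGetD pvDx i 0)
      (y + PySem.List.pyGetD pvDy i 0)) =
      ((fun de : Int × Int => pvCheck place x y (x + de.1) (y + de.2)) ∘
        (fun i => (PySem.List.pyGetD pvDx i 0, PySem.List.pyGetD pvDy i 0))) := rfl
  have hlist : (PySem.List.pyRange 0 12 1).map
      (fun i => (PySem.List.pyGetD pvDx i 0, PySem.List.pyGetD pvDy i 0)) =
      [(0,1),(0,-1),(1,0),(-1,0),(1,1),(1,-1),(-1,1),(-1,-1),(0,2),(0,-2),(2,0),(-2,0)] := by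
    decide
  rw [hfun, ← List.findSome?_map, hlist]
  by_cases h : ∃ q ∈ pvPs place, pvSees place x y q.1 q.2 = true
  · rw [if_pos h]
    apply pvFindSome_some_zero
    · intro de _; exact pvCheck_none_or place x y _ _
    · obtain ⟨⟨a, b⟩, hq, hsee⟩ := h
      obtain ⟨c1, c2, c3, c4, c5⟩ := (pvPs_mem place (a, b)).mp hq
      have hs12 := pvSees_shape place x y a b hsee
      have ea : x + (a - x) = a := by omega
      have eb : y + (b - y) = b := by omega
      refine ⟨(a - x, b - y), ?_, ?_⟩
      · rcases hcase12 x y a b hs12 with ⟨e1, e2⟩|⟨e1, e2⟩|⟨e1, e2⟩|⟨e1, e2⟩|⟨e1, e2⟩|⟨e1, e2⟩|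
          ⟨e1, e2⟩|⟨e1, e2⟩|⟨e1, e2⟩|⟨e1, e2⟩|⟨e1, e2⟩|⟨e1, e2⟩ <;>
          simp only [List.mem_cons, Prod.mk.injEq] <;> omega
      · rw [pvCheck_iff place x y _ _ (by omega)]
        refine ⟨by omega, by omega, by omega, by omega, ?_, ?_⟩
        · rw [ea, eb]; exact c5
        · rw [ea, eb]; exact hsee
  · rw [if_neg h, List.findSome?_eq_none_iff]
    intro de hde
    fin_cases hde <;> exact pvCheck_none_of place x y _ _ (by omega) h

lemma pvLoop_eq (place : List String) (l : List (Int × Int)) :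
    pvLoop place l =
      if ∃ p ∈ l, ∃ q ∈ pvPs place, pvSees place p.1 p.2 q.1 q.2 = true then 0 else 1 := by
  induction l with
  | nil => simp [pvLoop]
  | cons p rest ih =>
    obtain ⟨x, y⟩ := p
    rw [pvLoop, pvScan_eq]
    by_cases h : ∃ q ∈ pvPs place, pvSees place x y q.1 q.2 = true
    · rw [if_pos h]
      have hv : ∃ p ∈ (x, y) :: rest, ∃ q ∈ pvPs place, pvSees place p.1 p.2 q.1 q.2 = true :=
        ⟨(x, y), by simp, h⟩
      rw [if_pos hv]
    · rw [if_neg h]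
      simp only [ih]
      have hiff : (∃ p ∈ (x, y) :: rest, ∃ q ∈ pvPs place, pvSees place p.1 p.2 q.1 q.2 = true) ↔
          (∃ p ∈ rest, ∃ q ∈ pvPs place, pvSees place p.1 p.2 q.1 q.2 = true) := by
        constructor
        · rintro ⟨p, hp, hq⟩
          rcases List.mem_cons.mp hp with rfl | hp'
          · exact absurd hq h
          · exact ⟨p, hp', hq⟩
        · rintro ⟨p, hp, hq⟩; exact ⟨p, List.mem_cons_of_mem _ hp, hq⟩
      rw [if_congr hiff rfl rfl]

lemma pvPairs_eq (place : List String) (l : List (Int × Int)) :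
    pvPairs place l =
      if ∃ p ∈ l, ∃ q ∈ l, pvSees place p.1 p.2 q.1 q.2 = true then 0 else 1 := by
  induction l with
  | nil => simp [pvPairs]
  | cons p rest ih =>
    obtain ⟨x, y⟩ := p
    rw [pvPairs]
    by_cases h : List.any rest (fun q => pvSees place x y q.1 q.2) = true
    · rw [if_pos h]
      obtain ⟨q, hq, hsee⟩ := List.any_eq_true.mp h
      have hv : ∃ p ∈ (x, y) :: rest, ∃ q ∈ (x, y) :: rest,
          pvSees place p.1 p.2 q.1 q.2 = true :=
        ⟨(x, y), by simp, q, List.mem_cons_of_mem _ hq, hsee⟩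
      rw [if_pos hv]
    · rw [if_neg h, ih]
      have hnot : ∀ r ∈ rest, pvSees place x y r.1 r.2 = false := by
        intro r hr
        by_contra hc
        exact h (List.any_eq_true.mpr ⟨r, hr, by simpa using hc⟩)
      have hiff : (∃ p ∈ (x, y) :: rest, ∃ q ∈ (x, y) :: rest,
            pvSees place p.1 p.2 q.1 q.2 = true) ↔
          (∃ p ∈ rest, ∃ q ∈ rest, pvSees place p.1 p.2 q.1 q.2 = true) := by
        constructor
        · rintro ⟨p, hp, q, hq, hsee⟩
          rcases List.mem_cons.mp hp with rfl | hp'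
          · rcases List.mem_cons.mp hq with rfl | hq'
            · rw [pvSees_irrefl] at hsee; cases hsee
            · rw [hnot q hq'] at hsee; cases hsee
          · rcases List.mem_cons.mp hq with rfl | hq'
            · rw [pvSees_symm] at hsee
              rw [hnot p hp'] at hsee; cases hsee
            · exact ⟨p, hp', q, hq', hsee⟩
        · rintro ⟨p, hp, q, hq, hsee⟩
          exact ⟨p, List.mem_cons_of_mem _ hp, q, List.mem_cons_of_mem _ hq, hsee⟩
      rw [if_congr hiff rfl rfl]

lemma pvA_eq (place : List String) :
    bfs place =
      if ∃ p ∈ pvPs place, ∃ q ∈ pvPs place, pvSees place p.1 p.2 q.1 q.2 = true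
      then 0 else 1 := by
  unfold bfs
  have hbuild : ((PySem.List.pyRange 0 5 1).foldl (fun acc i =>
      (PySem.List.pyRange 0 5 1).foldl (fun acc2 j =>
        if pvCell place i j == 'P' then acc2 ++ [(i, j)] else acc2) acc) []) = pvPs place := by
    simp only [PySem.List.foldl_append_if]
    rw [pvPs, ← List.flatMap_eq_foldl]
  rw [hbuild, pvLoop_eq]

-- ===== VERDICT (by name: the statement is the Claim_ definition above) =====
theorem bfs_spec : Claim_equal_bfs := by
  intro place _ _
  unfold Spec_bfs
  rw [pvA_eq]
  show _ = pvPairs place (pvPs place)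
  rw [pvPairs_eq place (pvPs place)]
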